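-- pv_equiv track=rewrite | github.com/hillerlab/TOGA | modules/inact_mut_check.py | get_exon_pairs
-- ===== SOURCE A (Python) =====
-- def get_exon_pairs(exon_stat):
--     """Get pairs of I exons separated by Deleted."""
--     # for example, it we have exon start like this:
--     # exon_num:  0-1-2-3-4-5-6-7-8-9-10-11
--     # exon_stat: X-I-D-D-I-I-D-I-I-M-D---I
--     # then we need the following output:
--     # (1, 4), (5, 7). Pair (8, 11) is skipped
--     # because there is a M exon between them.
--     pairs = []
--     pair_init = None
--     for num, stat in enumerate(exon_stat):
--         if num == 0:  # X - placeholder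
--             continue
--         prev_num = num - 1
--         prev_stat = exon_stat[prev_num]
--
--         if stat == "I" and pair_init is None:
--             continue
--         elif stat == "I" and pair_init:
--             # pair is initiated, let's close it
--             pair = (pair_init, num)
--             pairs.append(pair)
--             pair_init = None
--
--         if stat == "M":
--             # something like I-D-D-M-D-I -> then we skip it
--             pair_init = None
--             continue
--
--         if stat == "D" or stat == "mD":
--             # the most interesting case
--             # deleted or masked deleted
--             if pair_init is None and prev_stat == "I":
--                 # initiate new pair
--                 # prev elem was I
--                 pair_init = prev_num
--                 continue
--             else:
--                 continue
--     return pairs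
-- ===== SOURCE B (Python) =====
-- def get_exon_pairs(exon_stat):
--     """Get pairs of I exons separated by Deleted."""
--     i_idx = [n for n, s in enumerate(exon_stat) if s == "I" and n > 0]
--     pairs = []
--     for a, b in zip(i_idx, i_idx[1:]):
--         if exon_stat[a + 1] in ("D", "mD") and "M" not in exon_stat[a + 1 : b]:
--             pairs.append((a, b))
--     return pairs
-- ===== Notes on version B (the rewrite author's own statement) =====
-- stated objective: alternative
-- what changed: Replaces A's single stateful forward scan carrying a pair_init register with a two-phase decomposition: first collect the positions of I-exons (index > 0), then test each adjacent pair for a deletion right after the left I and no M in the gap.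
-- intended difference: When exon 0 (the placeholder slot) is 'I' and exon 1 is 'D'/'mD', A sets pair_init = 0, which is falsy in Python, so A silently drops every I-deleted-I pair occurring before the first 'M' and returns a list missing those pairs; B returns them, which is the intended behaviour A's docstring describes. — e.g. on get_exon_pairs(["I", "D", "I", "D", "I"]): A returns [], B returns [(2, 4)]
import Mathlib
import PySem

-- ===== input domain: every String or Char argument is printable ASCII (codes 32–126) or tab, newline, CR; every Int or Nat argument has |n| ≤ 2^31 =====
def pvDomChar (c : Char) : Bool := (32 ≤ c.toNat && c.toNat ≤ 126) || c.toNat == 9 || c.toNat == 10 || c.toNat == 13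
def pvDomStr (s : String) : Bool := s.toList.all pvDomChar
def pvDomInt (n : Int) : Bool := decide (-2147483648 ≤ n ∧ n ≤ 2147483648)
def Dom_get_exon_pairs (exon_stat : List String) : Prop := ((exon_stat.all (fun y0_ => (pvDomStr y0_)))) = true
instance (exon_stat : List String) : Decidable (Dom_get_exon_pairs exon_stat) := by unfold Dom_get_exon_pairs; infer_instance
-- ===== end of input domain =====

-- B re-implements the I-exon pair scan as index-list + adjacent-gap checks (alternative decomposition);
-- on inputs hitting A's falsy pair_init=0 quirk (exon 0 marked "I" followed by a deletion) B returns the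
-- intended pairs where A silently drops them — see D_get_exon_pairs.


-- ===== PORT A =====
-- one loop step of A: state = (pairs, pair_init); pair_init truthy in Python ⟺ ≠ none ∧ ≠ some 0
def pairsStep (ctx : List String) (st : List (Int × Int) × Option Int) (p : Int × String) :
    List (Int × Int) × Option Int :=
  if p.1 = 0 then st
  else
    let prev_stat := (PySem.List.pyGet? ctx (p.1 - 1)).getD ""
    if p.2 = "I" ∧ st.2 = none then st
    else
      let st1 := if p.2 = "I" ∧ st.2 ≠ none ∧ st.2 ≠ some 0 then
          (st.1 ++ [(st.2.getD 0, p.1)], (none : Option Int)) else st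
      if p.2 = "M" then (st1.1, none)
      else if p.2 = "D" ∨ p.2 = "mD" then
        if st1.2 = none ∧ prev_stat = "I" then (st1.1, some (p.1 - 1)) else st1
      else st1

def pairsFold (ctx t : List String) : List (Int × Int) × Option Int :=
  (PySem.List.enumerate t).foldl (pairsStep ctx) ([], none)

def get_exon_pairs (exon_stat : List String) : List (Int × Int) :=
  (pairsFold exon_stat exon_stat).1

-- ===== PORT B =====
-- exon_stat[a+1] in ("D","mD") and "M" not in exon_stat[a+1:b]
def bCheck (ctx : List String) (a b : Int) : Bool :=
  ((PySem.List.pyGet? ctx (a + 1)).getD "" == "D" || (PySem.List.pyGet? ctx (a + 1)).getD "" == "mD")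
    && !((PySem.List.slice ctx (some (a + 1)) (some b)).contains "M")

-- [n for n, s in enumerate(exon_stat) if s == "I" and n > 0]
def iIdx (t : List String) : List Int :=
  ((PySem.List.enumerate t).filter (fun p => p.2 == "I" && decide ((0 : Int) < p.1))).map Prod.fst

def get_exon_pairs_alt (exon_stat : List String) : List (Int × Int) :=
  let i := iIdx exon_stat
  (i.zip i.tail).foldl (fun pairs ab => if bCheck exon_stat ab.1 ab.2 then pairs ++ [ab] else pairs) []

-- ===== PRECONDITION & SPEC =====
-- On inputs whose exon 0 (the "X" placeholder slot) is "I" directly followed by a deleted exon, A sets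
-- pair_init = 0, which is falsy in Python, so every I–deleted–I pair before the first "M" is silently
-- dropped by A; B returns those pairs, which is the intended behaviour described in A's docstring.
def D_get_exon_pairs (exon_stat : List String) : Prop :=
  exon_stat.getD 0 "" = "I" ∧ exon_stat.getD 1 "" ∈ ["D", "mD"] ∧
  ∃ b < exon_stat.length, ∃ a < b, 0 < a ∧ exon_stat.getD a "" = "I" ∧
    exon_stat.getD b "" = "I" ∧ exon_stat.getD (a + 1) "" ∈ ["D", "mD"] ∧
    "M" ∉ exon_stat.take b

instance (exon_stat : List String) : Decidable (D_get_exon_pairs exon_stat) := by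
  unfold D_get_exon_pairs; infer_instance

def Spec_get_exon_pairs (exon_stat : List String) (out : List (Int × Int)) : Prop :=
  ¬ D_get_exon_pairs exon_stat → out = get_exon_pairs_alt exon_stat
instance (exon_stat : List String) (out : List (Int × Int)) : Decidable (Spec_get_exon_pairs exon_stat out) := by
  unfold Spec_get_exon_pairs; infer_instance

def pvDiffWitness_get_exon_pairs : List String := ["I", "D", "I", "D", "I"]
def pvDiffWitnessOut_get_exon_pairs : (List (Int × Int)) × (List (Int × Int)) := ([], [(2, 4)])

-- ===== CLAIM (what is proved, stated in full; the proofs are below) =====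
def Claim_unchanged_get_exon_pairs : Prop := ∀ (exon_stat : List String), Dom_get_exon_pairs exon_stat → Spec_get_exon_pairs exon_stat (get_exon_pairs exon_stat)
def Claim_exact_get_exon_pairs : Prop := ∀ (exon_stat : List String), Dom_get_exon_pairs exon_stat → D_get_exon_pairs exon_stat → get_exon_pairs exon_stat ≠ get_exon_pairs_alt exon_stat
def Claim_changed_get_exon_pairs : Prop := Dom_get_exon_pairs (pvDiffWitness_get_exon_pairs) ∧ D_get_exon_pairs (pvDiffWitness_get_exon_pairs) ∧ get_exon_pairs (pvDiffWitness_get_exon_pairs) = pvDiffWitnessOut_get_exon_pairs.1 ∧ get_exon_pairs_alt (pvDiffWitness_get_exon_pairs) = pvDiffWitnessOut_get_exon_pairs.2 ∧ pvDiffWitnessOut_get_exon_pairs.1 ≠ pvDiffWitnessOut_get_exon_pairs.2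

-- ===== LEMMAS AND PROOFS =====

-- proof-only helpers: last index holding "I", and the characterisation of A's pair_init state
def lastIdxI : List String → Option Nat
  | [] => none
  | x :: xs =>
    match lastIdxI xs with
    | some k => some (k + 1)
    | none => if x = "I" then some 0 else none

def stuckB (t : List String) : Bool :=
  decide (2 ≤ t.length) && (t.getD 0 "" == "I") && (t.getD 1 "" == "D" || t.getD 1 "" == "mD")
    && !(t.contains "M")

def piChar (t : List String) : Option Int :=
  if stuckB t then some 0
  else
    match lastIdxI t with
    | none => none
    | some a =>
      if 1 ≤ a ∧ a + 1 < t.length ∧ (t.getD (a + 1) "" = "D" ∨ t.getD (a + 1) "" = "mD")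
          ∧ (t.drop (a + 1)).contains "M" = false
      then some (a : Int) else none

lemma getD_append_lt (t : List String) (x : String) (k : Nat) (h : k < t.length) :
    (t ++ [x]).getD k "" = t.getD k "" := by
  simp [List.getD_eq_getElem?_getD, List.getElem?_append_left h]

lemma getD_append_self (t : List String) (x : String) :
    (t ++ [x]).getD t.length "" = x := by
  simp [List.getD_eq_getElem?_getD]

lemma lastIdxI_append (t : List String) (x : String) :
    lastIdxI (t ++ [x]) = if x = "I" then some t.length else lastIdxI t := by
  induction t with
  | nil => by_cases hx : x = "I" <;> simp [lastIdxI, hx]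
  | cons y t ih =>
    show (match lastIdxI (t ++ [x]) with
          | some k => some (k + 1)
          | none => if y = "I" then some 0 else none) = _
    rw [ih]
    by_cases hx : x = "I"
    · rw [if_pos hx, if_pos hx]; simp
    · rw [if_neg hx, if_neg hx]; rfl

lemma lastIdxI_spec (t : List String) :
    (∀ a, lastIdxI t = some a → a < t.length ∧ t.getD a "" = "I"
        ∧ ∀ k, a < k → k < t.length → t.getD k "" ≠ "I")
    ∧ (lastIdxI t = none → ∀ k, k < t.length → t.getD k "" ≠ "I") := by
  induction t using List.reverseRecOn with
  | nil => simp [lastIdxI]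
  | append_singleton t x ih =>
    rw [lastIdxI_append]
    by_cases hx : x = "I"
    · rw [if_pos hx]
      refine ⟨?_, by simp⟩
      rintro a ha
      obtain rfl : t.length = a := by simpa using ha
      refine ⟨by simp, by rw [getD_append_self]; exact hx, ?_⟩
      intro k hk1 hk2
      simp at hk2; omega
    · rw [if_neg hx]
      constructor
      · intro a ha
        obtain ⟨h1, h2, h3⟩ := ih.1 a ha
        refine ⟨by simp; omega, by rwa [getD_append_lt _ _ _ h1], ?_⟩
        intro k hk1 hk2
        simp at hk2
        rcases Nat.lt_or_ge k t.length with hk | hk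
        · rw [getD_append_lt _ _ _ hk]; exact h3 k hk1 hk
        · obtain rfl : k = t.length := by omega
          rw [getD_append_self]; exact hx
      · intro ha k hk
        simp at hk
        rcases Nat.lt_or_ge k t.length with hk' | hk'
        · rw [getD_append_lt _ _ _ hk']; exact ih.2 ha k hk'
        · obtain rfl : k = t.length := by omega
          rw [getD_append_self]; exact hx

lemma iIdx_append (t : List String) (x : String) :
    iIdx (t ++ [x]) = iIdx t ++ (if x = "I" ∧ 0 < t.length then [(t.length : Int)] else []) := by
  unfold iIdx
  rw [PySem.List.enumerate_append, List.filter_append, List.map_append]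
  congr 1
  rw [PySem.List.enumerate_cons, PySem.List.enumerate_nil]
  by_cases hx : x = "I" <;> by_cases hn : 0 < t.length <;>
    simp [hx, hn, Int.natCast_pos]

lemma mem_iIdx_iff (t : List String) (v : Int) :
    v ∈ iIdx t ↔ ∃ k : Nat, v = (k : Int) ∧ 0 < k ∧ k < t.length ∧ t.getD k "" = "I" := by
  unfold iIdx
  simp only [List.mem_map, List.mem_filter, PySem.List.mem_enumerate_iff]
  constructor
  · rintro ⟨⟨i, s⟩, ⟨⟨k, hk, hp⟩, hcond⟩, rfl⟩
    obtain ⟨rfl, rfl⟩ : i = (0 : Int) + (k : Int) ∧ s = t[k] := Prod.ext_iff.1 hp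
    simp only [Bool.and_eq_true, beq_iff_eq, decide_eq_true_eq] at hcond
    refine ⟨k, by ring, ?_, hk, ?_⟩
    · have := hcond.2; omega
    · rw [List.getD_eq_getElem?_getD, List.getElem?_eq_getElem hk]
      simpa using hcond.1
  · rintro ⟨k, rfl, hk0, hklen, hI⟩
    have hIg : t[k]'hklen = "I" := by
      rw [List.getD_eq_getElem?_getD, List.getElem?_eq_getElem hklen] at hI
      simpa using hI
    refine ⟨((0 : Int) + (k : Int), t[k]'hklen), ⟨⟨k, hklen, rfl⟩, ?_⟩, by simp⟩
    simp only [Bool.and_eq_true, beq_iff_eq, decide_eq_true_eq]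
    refine ⟨hIg, by omega⟩

lemma iIdx_sorted (t : List String) : (iIdx t).Pairwise (· < ·) := by
  unfold iIdx
  exact List.Pairwise.map Prod.fst (fun a b h => h)
    (List.Pairwise.filter _ (PySem.List.pairwise_lt_enumerate t 0))

lemma zip_tail_append (l : List Int) (y : Int) :
    (l ++ [y]).zip (l ++ [y]).tail
      = l.zip l.tail ++ (match l.getLast? with | some w => [(w, y)] | none => []) := by
  induction l with
  | nil => simp
  | cons a l ih =>
    cases l with
    | nil => simp
    | cons b l' =>
      simp only [List.cons_append, List.zip_cons_cons, List.tail_cons] at ih ⊢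
      rw [ih]
      simp [List.getLast?_cons_cons]

lemma mem_zip_tail_sorted {l : List Int} (hs : l.Pairwise (· < ·)) {a b : Int}
    (h : (a, b) ∈ l.zip l.tail) :
    a < b ∧ a ∈ l ∧ b ∈ l ∧ ∀ c ∈ l, ¬(a < c ∧ c < b) := by
  induction l with
  | nil => simp at h
  | cons u l ih =>
    cases l with
    | nil => simp at h
    | cons v l' =>
      simp only [List.tail_cons, List.zip_cons_cons, List.mem_cons, Prod.mk.injEq] at h
      have hpw := List.pairwise_cons.1 hs
      rcases h with ⟨rfl, rfl⟩ | h
      · refine ⟨hpw.1 b (by simp), by simp, by simp, ?_⟩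
        rintro c hc ⟨hac, hcb⟩
        rcases List.mem_cons.1 hc with rfl | hc
        · exact absurd hac (lt_irrefl _)
        · rcases List.mem_cons.1 hc with rfl | hc
          · exact absurd hcb (lt_irrefl _)
          · exact absurd (lt_trans ((List.pairwise_cons.1 hpw.2).1 c hc) hcb) (lt_irrefl _)
      · obtain ⟨h1, h2, h3, h4⟩ := ih hpw.2 h
        refine ⟨h1, List.mem_cons_of_mem _ h2, List.mem_cons_of_mem _ h3, ?_⟩
        rintro c hc ⟨hac, hcb⟩
        rcases List.mem_cons.1 hc with rfl | hc
        · exact absurd (lt_trans (hpw.1 a h2) hac) (lt_irrefl _)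
        · exact h4 c hc ⟨hac, hcb⟩

lemma getLast?_of_max {l : List Int} (hs : l.Pairwise (· < ·)) {v : Int}
    (hv : v ∈ l) (hmax : ∀ w ∈ l, w ≤ v) : l.getLast? = some v := by
  induction l with
  | nil => simp at hv
  | cons u l ih =>
    cases l with
    | nil =>
      obtain rfl : v = u := by simpa using hv
      rfl
    | cons w l' =>
      rw [List.getLast?_cons_cons]
      have hpw := List.pairwise_cons.1 hs
      apply ih hpw.2
      · rcases List.mem_cons.1 hv with rfl | hv'
        · exact absurd (lt_of_lt_of_le (hpw.1 w (by simp)) (hmax w (by simp))) (lt_irrefl _)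
        · exact hv'
      · exact fun c hc => hmax c (List.mem_cons_of_mem _ hc)

lemma iIdx_eq_nil (t : List String) (h : ∀ k : Nat, 0 < k → k < t.length → t.getD k "" ≠ "I") :
    iIdx t = [] := by
  rw [List.eq_nil_iff_forall_not_mem]
  intro v hv
  obtain ⟨k, rfl, hk0, hkl, hkI⟩ := (mem_iIdx_iff t v).1 hv
  exact h k hk0 hkl hkI

lemma iIdx_getLast (t : List String) (a : Nat) (h : lastIdxI t = some a) (ha : 0 < a) :
    (iIdx t).getLast? = some (a : Int) := by
  obtain ⟨h1, h2, h3⟩ := (lastIdxI_spec t).1 a h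
  apply getLast?_of_max (iIdx_sorted t)
  · exact (mem_iIdx_iff t _).2 ⟨a, rfl, ha, h1, h2⟩
  · intro w hw
    obtain ⟨k, rfl, hk0, hkl, hkI⟩ := (mem_iIdx_iff t _).1 hw
    by_contra hlt
    have hak : a < k := by omega
    exact h3 k hak hkl hkI

lemma pairsFold_append (ctx t : List String) (x : String) :
    pairsFold ctx (t ++ [x]) = pairsStep ctx (pairsFold ctx t) ((t.length : Int), x) := by
  unfold pairsFold
  rw [PySem.List.enumerate_append, List.foldl_append, PySem.List.enumerate_cons,
    PySem.List.enumerate_nil]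
  simp

lemma pairsFold_ctx (t ctx ctx' : List String)
    (h : ∀ i : Nat, i < t.length → ctx[i]? = ctx'[i]?) :
    pairsFold ctx t = pairsFold ctx' t := by
  induction t using List.reverseRecOn with
  | nil => rfl
  | append_singleton t x ih =>
    rw [pairsFold_append, pairsFold_append, ih (fun i hi => h i (by simp; omega))]
    rcases Nat.eq_zero_or_pos t.length with hn0 | hn
    · simp [pairsStep, hn0]
    · have h1 : ((t.length : Int) - 1) = ((t.length - 1 : Nat) : Int) := by omega
      unfold pairsStep
      simp only [h1, PySem.List.pyGet?_natCast,
        h (t.length - 1) (by simp only [List.length_append, List.length_cons, List.length_nil]; omega)]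

lemma alt_eq_filter (s : List String) :
    get_exon_pairs_alt s = ((iIdx s).zip (iIdx s).tail).filter (fun ab => bCheck s ab.1 ab.2) := by
  show (((iIdx s).zip (iIdx s).tail).foldl
      (fun pairs ab => if bCheck s ab.1 ab.2 then pairs ++ [ab] else pairs) []) = _
  induction ((iIdx s).zip (iIdx s).tail) using List.reverseRecOn with
  | nil => rfl
  | append_singleton l ab ih =>
    rw [List.foldl_append, List.filter_append, ih]
    by_cases hb : bCheck s ab.1 ab.2 <;> simp [hb]

lemma bCheck_eval (u : List String) (j k : Nat) :
    bCheck u (j : Int) (k : Int)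
      = ((u.getD (j + 1) "" == "D" || u.getD (j + 1) "" == "mD")
          && !(((u.drop (j + 1)).take (k - (j + 1))).contains "M")) := by
  unfold bCheck
  have h1 : ((j : Int) + 1) = ((j + 1 : Nat) : Int) := by omega
  rw [h1, PySem.List.pyGet?_natCast, PySem.List.slice_natCast, List.getD_eq_getElem?_getD]

lemma bCheck_stable (t : List String) (x : String) (j k : Nat)
    (hjk : j < k) (hk : k < t.length) :
    bCheck (t ++ [x]) (j : Int) (k : Int) = bCheck t (j : Int) (k : Int) := by
  rw [bCheck_eval, bCheck_eval, getD_append_lt _ _ _ (by omega),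
    List.drop_append_of_le_length (by omega),
    List.take_append_of_le_length (by simp only [List.length_drop]; omega)]

lemma bCheck_new (t : List String) (x : String) (a : Nat) (ha : a < t.length) :
    bCheck (t ++ [x]) (a : Int) (t.length : Int)
      = (((t ++ [x]).getD (a + 1) "" == "D" || (t ++ [x]).getD (a + 1) "" == "mD")
          && !((t.drop (a + 1)).contains "M")) := by
  rw [bCheck_eval, List.drop_append_of_le_length (by omega),
    List.take_append_of_le_length (by simp only [List.length_drop]; omega),
    List.take_of_length_le (by simp only [List.length_drop]; omega)]

lemma alt_append_notI (t : List String) (x : String) (hx : ¬(x = "I" ∧ 0 < t.length)) :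
    get_exon_pairs_alt (t ++ [x]) = get_exon_pairs_alt t := by
  rw [alt_eq_filter, alt_eq_filter, iIdx_append, if_neg hx, List.append_nil]
  apply List.filter_congr
  rintro ⟨a, b⟩ hab
  obtain ⟨hlt, ha, hb, -⟩ := mem_zip_tail_sorted (iIdx_sorted t) hab
  obtain ⟨j, rfl, hj0, hjl, -⟩ := (mem_iIdx_iff t _).1 ha
  obtain ⟨k, rfl, hk0, hkl, -⟩ := (mem_iIdx_iff t _).1 hb
  exact bCheck_stable t x j k (by exact_mod_cast hlt) hkl

lemma alt_append_I (t : List String) (hn : 0 < t.length) :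
    get_exon_pairs_alt (t ++ ["I"]) = get_exon_pairs_alt t ++
      (match (iIdx t).getLast? with
       | none => []
       | some w => if bCheck (t ++ ["I"]) w (t.length : Int) then [(w, (t.length : Int))] else []) := by
  rw [alt_eq_filter, alt_eq_filter, iIdx_append, if_pos ⟨rfl, hn⟩, zip_tail_append,
    List.filter_append]
  congr 1
  · apply List.filter_congr
    rintro ⟨a, b⟩ hab
    obtain ⟨hlt, ha, hb, -⟩ := mem_zip_tail_sorted (iIdx_sorted t) hab
    obtain ⟨j, rfl, hj0, hjl, -⟩ := (mem_iIdx_iff t _).1 ha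
    obtain ⟨k, rfl, hk0, hkl, -⟩ := (mem_iIdx_iff t _).1 hb
    exact bCheck_stable t "I" j k (by exact_mod_cast hlt) hkl
  · cases h : (iIdx t).getLast? with
    | none => simp
    | some w =>
      by_cases hb : bCheck (t ++ ["I"]) w (t.length : Int) <;> simp [hb]

lemma contains_false_iff (l : List String) (y : String) : l.contains y = false ↔ y ∉ l := by
  cases h : l.contains y <;> simp_all

lemma alt_nil_of_stuck (u : List String) (hs : stuckB u = true) (hD : ¬ D_get_exon_pairs u) :
    get_exon_pairs_alt u = [] := by
  rw [alt_eq_filter]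
  by_contra hne
  obtain ⟨ab, hab⟩ := List.exists_mem_of_ne_nil _ hne
  have hmem := List.mem_filter.1 hab
  obtain ⟨a, b⟩ := ab
  obtain ⟨hlt, haM, hbM, -⟩ := mem_zip_tail_sorted (iIdx_sorted u) hmem.1
  obtain ⟨j, rfl, hj0, hjl, hjI⟩ := (mem_iIdx_iff u _).1 haM
  obtain ⟨k, rfl, hk0, hkl, hkI⟩ := (mem_iIdx_iff u _).1 hbM
  have hjk : j < k := by exact_mod_cast hlt
  simp only [stuckB, Bool.and_eq_true, decide_eq_true_eq, beq_iff_eq, Bool.or_eq_true,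
    Bool.not_eq_true'] at hs
  obtain ⟨⟨⟨hlen2, h0I⟩, h1D⟩, hnoM⟩ := hs
  have hnoM' : ∀ m : Nat, m < u.length → u.getD m "" ≠ "M" := by
    intro m hm hMm
    have : "M" ∈ u := by
      rw [List.getD_eq_getElem?_getD, List.getElem?_eq_getElem hm] at hMm
      simp at hMm
      exact hMm ▸ List.getElem_mem hm
    have hc : u.contains "M" = true := by simpa [List.contains_iff_mem] using this
    rw [hc] at hnoM; cases hnoM
  have hcond := hmem.2
  rw [bCheck_eval] at hcond
  simp only [Bool.and_eq_true, Bool.or_eq_true, beq_iff_eq, Bool.not_eq_true'] at hcond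
  apply hD
  rw [contains_false_iff] at hnoM
  exact ⟨h0I, by simpa using h1D, k, hkl, j, hjk, hj0, hjI, hkI, by simpa using hcond.1,
    fun hm => hnoM (List.take_subset _ _ hm)⟩

lemma D_mono (t : List String) (x : String) (h : D_get_exon_pairs t) :
    D_get_exon_pairs (t ++ [x]) := by
  obtain ⟨h0, h1, b, hb, a, hab, ha0, haI, hbI, haD, hnoM⟩ := h
  have h2 : 2 ≤ t.length := by
    by_contra hc
    have he : t.getD 1 "" = "" := by
      rw [List.getD_eq_getElem?_getD, List.getElem?_eq_none (by omega)]; rfl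
    rw [he] at h1
    simp at h1
  refine ⟨by rwa [getD_append_lt _ _ _ (by omega)],
    by rwa [getD_append_lt _ _ _ (by omega)],
    b, by simp; omega, a, hab, ha0,
    by rwa [getD_append_lt _ _ _ (by omega)],
    by rwa [getD_append_lt _ _ _ (by omega)],
    by rwa [getD_append_lt _ _ _ (by omega)], ?_⟩
  rwa [List.take_append_of_le_length (by omega)]

lemma stuck_keep (t : List String) (x : String) (hs : stuckB t = true) (hx : x ≠ "M") :
    stuckB (t ++ [x]) = true := by
  simp only [stuckB, Bool.and_eq_true, decide_eq_true_eq, beq_iff_eq, Bool.or_eq_true,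
    Bool.not_eq_true'] at hs ⊢
  obtain ⟨⟨⟨h2, h0⟩, h1⟩, hM⟩ := hs
  refine ⟨⟨⟨by simp; omega, by rwa [getD_append_lt _ _ _ (by omega)]⟩,
    by rwa [getD_append_lt _ _ _ (by omega)]⟩, ?_⟩
  rw [contains_false_iff] at hM ⊢
  simp only [List.mem_append, List.mem_singleton]
  rintro (h | h)
  · exact hM h
  · exact hx h.symm

lemma stuck_M (t : List String) : stuckB (t ++ ["M"]) = false := by
  simp [stuckB]

lemma stuck_one (t : List String) (x : String) (h1 : t.length = 1) (h0 : t.getD 0 "" = "I")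
    (hx : x = "D" ∨ x = "mD") : stuckB (t ++ [x]) = true := by
  simp only [stuckB, Bool.and_eq_true, decide_eq_true_eq, beq_iff_eq, Bool.or_eq_true,
    Bool.not_eq_true']
  refine ⟨⟨⟨by simp; omega, by rwa [getD_append_lt _ _ _ (by omega)]⟩, ?_⟩, ?_⟩
  · have hg : (t ++ [x]).getD 1 "" = x := by
      rw [show (1 : Nat) = t.length from h1.symm, getD_append_self]
    rw [hg]
    rcases hx with h | h <;> simp [h]
  · rw [contains_false_iff]
    simp only [List.mem_append, List.mem_singleton]
    rintro (h | h)
    · have : t.getD 0 "" = "M" := by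
        have h0' : (0 : Nat) < t.length := by omega
        obtain ⟨i, hi, hig⟩ := List.mem_iff_getElem.1 h
        obtain rfl : i = 0 := by omega
        rw [List.getD_eq_getElem?_getD, List.getElem?_eq_getElem hi, hig]; rfl
      rw [h0] at this; exact absurd this (by decide)
    · rcases hx with h' | h' <;> rw [h'] at h <;> exact absurd h.symm (by decide)

lemma stuck_no (t : List String) (x : String) (hs : stuckB t = false)
    (hone : ¬(t.length = 1 ∧ t.getD 0 "" = "I" ∧ (x = "D" ∨ x = "mD"))) :
    stuckB (t ++ [x]) = false := by
  by_contra hc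
  have hc' : stuckB (t ++ [x]) = true := by
    cases h : stuckB (t ++ [x]); exact absurd h hc; rfl
  simp only [stuckB, Bool.and_eq_true, decide_eq_true_eq, beq_iff_eq, Bool.or_eq_true,
    Bool.not_eq_true'] at hc'
  obtain ⟨⟨⟨h2, h0⟩, h1⟩, hM⟩ := hc'
  simp only [List.length_append, List.length_cons, List.length_nil] at h2
  rcases Nat.lt_or_ge t.length 2 with hlen | hlen
  · have hl1 : t.length = 1 := by omega
    apply hone
    refine ⟨hl1, by rwa [getD_append_lt _ _ _ (by omega)] at h0, ?_⟩
    have hg : (t ++ [x]).getD 1 "" = x := by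
      rw [show (1 : Nat) = t.length from hl1.symm, getD_append_self]
    rwa [hg] at h1
  · rw [getD_append_lt _ _ _ (by omega)] at h0
    rw [getD_append_lt _ _ _ (by omega)] at h1
    rw [contains_false_iff] at hM
    have hMt : t.contains "M" = false := by
      rw [contains_false_iff]; intro hm; exact hM (by simp [hm])
    have : stuckB t = true := by
      simp only [stuckB, Bool.and_eq_true, decide_eq_true_eq, beq_iff_eq, Bool.or_eq_true,
        Bool.not_eq_true']
      exact ⟨⟨⟨hlen, h0⟩, h1⟩, hMt⟩
    rw [this] at hs; cases hs

lemma piChar_stuck (u : List String) (h : stuckB u = true) : piChar u = some 0 := by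
  unfold piChar; rw [if_pos h]

lemma piChar_not_stuck (u : List String) (h : stuckB u = false) :
    piChar u = (match lastIdxI u with
      | none => none
      | some a =>
        if 1 ≤ a ∧ a + 1 < u.length ∧ (u.getD (a + 1) "" = "D" ∨ u.getD (a + 1) "" = "mD")
            ∧ (u.drop (a + 1)).contains "M" = false
        then some (a : Int) else none) := by
  unfold piChar; rw [if_neg (by rw [h]; exact Bool.false_ne_true)]

lemma piChar_eval_none (u : List String) (hs : stuckB u = false) (hl : lastIdxI u = none) :
    piChar u = none := by
  rw [piChar_not_stuck u hs, hl]

lemma piChar_eval_some (u : List String) (a : Nat) (hs : stuckB u = false)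
    (hl : lastIdxI u = some a) :
    piChar u = if 1 ≤ a ∧ a + 1 < u.length ∧ (u.getD (a + 1) "" = "D" ∨ u.getD (a + 1) "" = "mD")
        ∧ (u.drop (a + 1)).contains "M" = false
      then some (a : Int) else none := by
  rw [piChar_not_stuck u hs, hl]

lemma dropM_append (t : List String) (x : String) (m : Nat) (hm : m ≤ t.length) :
    ((t ++ [x]).drop m).contains "M" = false ↔
      ((t.drop m).contains "M" = false ∧ x ≠ "M") := by
  rw [List.drop_append_of_le_length hm, contains_false_iff, contains_false_iff]
  simp only [List.mem_append, List.mem_singleton]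
  constructor
  · exact fun h => ⟨fun hm' => h (Or.inl hm'), fun hx => h (Or.inr hx.symm)⟩
  · rintro ⟨h1, h2⟩ (h | h)
    · exact h1 h
    · exact h2 h.symm

lemma lastIdxI_of_last (t : List String) (hn : 0 < t.length)
    (h : t.getD (t.length - 1) "" = "I") : lastIdxI t = some (t.length - 1) := by
  cases hli : lastIdxI t with
  | none => exact absurd h ((lastIdxI_spec t).2 hli _ (by omega))
  | some a =>
    obtain ⟨h1, h2, h3⟩ := (lastIdxI_spec t).1 a hli
    rcases Nat.lt_or_ge a (t.length - 1) with ha | ha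
    · exact absurd h (h3 _ (by omega) (by omega))
    · congr 1; omega

lemma pairsStep_skipI (ctx : List String) (st : List (Int × Int) × Option Int) (n : Int)
    (x : String) (hn : ¬ n = 0) (hxI : x = "I") (hpi : st.2 = none) :
    pairsStep ctx st (n, x) = st := by
  subst hxI; unfold pairsStep; simp [hn, hpi]

lemma pairsStep_closeI (ctx : List String) (st : List (Int × Int) × Option Int) (n : Int)
    (x : String) (v : Int) (hn : ¬ n = 0) (hxI : x = "I") (hpi : st.2 = some v) (hv : ¬ v = 0) :
    pairsStep ctx st (n, x) = (st.1 ++ [(v, n)], none) := by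
  subst hxI; unfold pairsStep; simp [hn, hpi, hv]

lemma pairsStep_Izero (ctx : List String) (st : List (Int × Int) × Option Int) (n : Int)
    (x : String) (hn : ¬ n = 0) (hxI : x = "I") (hpi : st.2 = some 0) :
    pairsStep ctx st (n, x) = st := by
  subst hxI; unfold pairsStep; simp [hn, hpi]

lemma pairsStep_M (ctx : List String) (st : List (Int × Int) × Option Int) (n : Int)
    (hn : ¬ n = 0) :
    pairsStep ctx st (n, "M") = (st.1, none) := by
  unfold pairsStep; simp [hn]

lemma pairsStep_D (ctx : List String) (st : List (Int × Int) × Option Int) (n : Int)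
    (x : String) (hn : ¬ n = 0) (hxM : ¬ x = "M") (hxD : x = "D" ∨ x = "mD") :
    pairsStep ctx st (n, x)
      = if st.2 = none ∧ (PySem.List.pyGet? ctx (n - 1)).getD "" = "I"
        then (st.1, some (n - 1)) else st := by
  have hxI : ¬ x = "I" := by rcases hxD with h | h <;> subst h <;> decide
  unfold pairsStep; simp [hn, hxI, hxM, hxD]

lemma pairsStep_other (ctx : List String) (st : List (Int × Int) × Option Int) (n : Int)
    (x : String) (hn : ¬ n = 0) (hxI : ¬ x = "I") (hxM : ¬ x = "M")
    (hxD : ¬ (x = "D" ∨ x = "mD")) :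
    pairsStep ctx st (n, x) = st := by
  unfold pairsStep; simp [hn, hxI, hxM, hxD]

lemma main_inv (t : List String) (hD : ¬ D_get_exon_pairs t) :
    pairsFold t t = (get_exon_pairs_alt t, piChar t) := by
  induction t using List.reverseRecOn with
  | nil => decide
  | append_singleton t x ih =>
    have hDt : ¬ D_get_exon_pairs t := fun hd => hD (D_mono t x hd)
    have hctx : pairsFold (t ++ [x]) t = pairsFold t t :=
      pairsFold_ctx t _ _ (fun i hi => List.getElem?_append_left hi)
    rw [pairsFold_append, hctx, ih hDt]
    rcases Nat.eq_zero_or_pos t.length with hn0 | hn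
    · obtain rfl : t = [] := List.eq_nil_of_length_eq_zero hn0
      have hiI : iIdx [x] = [] := by
        simp [iIdx, PySem.List.enumerate_cons, PySem.List.enumerate_nil]
      have halt : get_exon_pairs_alt [x] = [] := by rw [alt_eq_filter, hiI]; rfl
      have hpc : piChar [x] = none := by
        by_cases hx : x = "I" <;> simp [piChar, stuckB, lastIdxI, hx]
      show pairsStep [x] (get_exon_pairs_alt [], piChar []) (((0 : Nat) : Int), x)
        = (get_exon_pairs_alt [x], piChar [x])
      rw [halt, hpc]
      show pairsStep [x] ([], none) (((0 : Nat) : Int), x) = ([], none)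
      simp [pairsStep]
    · -- 0 < t.length
      have hprev : (PySem.List.pyGet? (t ++ [x]) ((t.length : Int) - 1)).getD ""
          = t[t.length - 1]?.getD "" := by
        have h1 : ((t.length : Int) - 1) = ((t.length - 1 : Nat) : Int) := by omega
        rw [h1, PySem.List.pyGet?_natCast, List.getElem?_append_left (by omega)]
      have hne0 : ¬ ((t.length : Int) = 0) := by omega
      by_cases hst : stuckB t = true
      · -- stuck state: pair_init = 0, A's pair list is empty and stays empty
        have haltt : get_exon_pairs_alt t = [] := alt_nil_of_stuck t hst hDt
        rw [piChar_stuck t hst, haltt]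
        by_cases hxM : x = "M"
        · subst hxM
          have hA : get_exon_pairs_alt (t ++ ["M"]) = [] := by
            rw [alt_append_notI t "M" (by simp), haltt]
          have hP : piChar (t ++ ["M"]) = none := by
            cases hli : lastIdxI (t ++ ["M"]) with
            | none => exact piChar_eval_none _ (stuck_M t) hli
            | some a =>
              rw [piChar_eval_some _ a (stuck_M t) hli, if_neg]
              rw [lastIdxI_append, if_neg (by decide)] at hli
              obtain ⟨h1, -, -⟩ := (lastIdxI_spec t).1 a hli
              rintro ⟨-, -, -, hM⟩
              rw [dropM_append t "M" (a + 1) (by omega)] at hM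
              exact hM.2 rfl
          rw [hA, hP, pairsStep_M _ _ _ hne0]
        · have hsx : stuckB (t ++ [x]) = true := stuck_keep t x hst hxM
          have hA : get_exon_pairs_alt (t ++ [x]) = [] := alt_nil_of_stuck _ hsx hD
          rw [hA, piChar_stuck _ hsx]
          by_cases hxI : x = "I"
          · rw [pairsStep_Izero _ _ _ _ hne0 hxI rfl]
          · by_cases hxD : x = "D" ∨ x = "mD"
            · rw [pairsStep_D _ _ _ _ hne0 hxM hxD, if_neg (by rintro ⟨h, -⟩; simp at h)]
            · rw [pairsStep_other _ _ _ _ hne0 hxI hxM hxD]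
      · have hstf : stuckB t = false := by
          cases h : stuckB t; rfl; exact absurd h hst
        cases hli : lastIdxI t with
        | none =>
          have hpit : piChar t = none := piChar_eval_none t hstf hli
          rw [hpit]
          have hnoI : ∀ k, k < t.length → t.getD k "" ≠ "I" := (lastIdxI_spec t).2 hli
          have hii : iIdx t = [] := iIdx_eq_nil t (fun k _ hk => hnoI k hk)
          have hpv : ¬ t[t.length - 1]?.getD "" = "I" := by
            rw [← List.getD_eq_getElem?_getD]; exact hnoI _ (by omega)
          have hnost : stuckB (t ++ [x]) = false := by
            apply stuck_no t x hstf
            rintro ⟨h1, h0, -⟩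
            apply hpv
            rw [← List.getD_eq_getElem?_getD, show t.length - 1 = 0 by omega]
            exact h0
          have hP : piChar (t ++ [x]) = none := by
            by_cases hx : x = "I"
            · rw [piChar_eval_some _ t.length hnost
                (by rw [lastIdxI_append, if_pos hx]), if_neg]
              rintro ⟨-, hlt, -, -⟩
              simp only [List.length_append, List.length_cons, List.length_nil] at hlt
              omega
            · exact piChar_eval_none _ hnost (by rw [lastIdxI_append, if_neg hx]; exact hli)
          have hA : get_exon_pairs_alt (t ++ [x]) = get_exon_pairs_alt t := by
            by_cases hx : x = "I"
            · subst hx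
              rw [alt_append_I t hn, hii]
              simp
            · exact alt_append_notI t x (fun h => hx h.1)
          rw [hA, hP]
          by_cases hxI : x = "I"
          · rw [pairsStep_skipI _ _ _ _ hne0 hxI rfl]
          · by_cases hxM : x = "M"
            · subst hxM; rw [pairsStep_M _ _ _ hne0]
            · by_cases hxD : x = "D" ∨ x = "mD"
              · rw [pairsStep_D _ _ _ _ hne0 hxM hxD,
                  if_neg (by rintro ⟨-, h⟩; rw [hprev] at h; exact hpv h)]
              · rw [pairsStep_other _ _ _ _ hne0 hxI hxM hxD]
        | some a =>
          obtain ⟨haln, haI, hano⟩ := (lastIdxI_spec t).1 a hli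
          by_cases hbr : 1 ≤ a ∧ a + 1 < t.length
              ∧ (t.getD (a + 1) "" = "D" ∨ t.getD (a + 1) "" = "mD")
              ∧ (t.drop (a + 1)).contains "M" = false
          · have hpit : piChar t = some (a : Int) := by
              rw [piChar_eval_some t a hstf hli]; exact if_pos hbr
            rw [hpit]
            obtain ⟨ha1, ha2, ha3, ha4⟩ := hbr
            have ha0 : ¬ (((a : Nat) : Int) = 0) := by omega
            by_cases hxI : x = "I"
            · subst hxI
              have hb : bCheck (t ++ ["I"]) (a : Int) (t.length : Int) = true := by
                rw [bCheck_new t "I" a haln, getD_append_lt _ _ _ ha2]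
                have h4 : "M" ∉ List.drop (a + 1) t := (contains_false_iff _ _).1 ha4
                rcases ha3 with h | h <;> rw [List.getD_eq_getElem?_getD] at h <;>
                  simp [h, h4]
              have hA : get_exon_pairs_alt (t ++ ["I"])
                  = get_exon_pairs_alt t ++ [((a : Int), (t.length : Int))] := by
                rw [alt_append_I t hn, iIdx_getLast t a hli ha1]
                simp [hb]
              have hP : piChar (t ++ ["I"]) = none := by
                rw [piChar_eval_some _ t.length
                  (stuck_no t "I" hstf (by rintro ⟨-, -, h | h⟩ <;> simp at h))
                  (by rw [lastIdxI_append]; rfl), if_neg]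
                rintro ⟨-, hlt, -, -⟩
                simp only [List.length_append, List.length_cons, List.length_nil] at hlt
                omega
              rw [hA, hP, pairsStep_closeI _ _ _ _ ((a : Nat) : Int) hne0 rfl rfl ha0]
            · by_cases hxM : x = "M"
              · subst hxM
                have hA : get_exon_pairs_alt (t ++ ["M"]) = get_exon_pairs_alt t :=
                  alt_append_notI t "M" (by simp)
                have hP : piChar (t ++ ["M"]) = none := by
                  rw [piChar_eval_some _ a (stuck_M t)
                    (by rw [lastIdxI_append, if_neg (by decide)]; exact hli), if_neg]
                  rintro ⟨-, -, -, hM⟩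
                  rw [dropM_append t "M" (a + 1) (by omega)] at hM
                  exact hM.2 rfl
                rw [hA, hP, pairsStep_M _ _ _ hne0]
              · have hA : get_exon_pairs_alt (t ++ [x]) = get_exon_pairs_alt t :=
                  alt_append_notI t x (fun h => hxI h.1)
                have hP : piChar (t ++ [x]) = some (a : Int) := by
                  rw [piChar_eval_some _ a
                    (stuck_no t x hstf (by rintro ⟨h1, -, -⟩; omega))
                    (by rw [lastIdxI_append, if_neg hxI]; exact hli), if_pos]
                  refine ⟨ha1, by simp; omega, by rwa [getD_append_lt _ _ _ ha2], ?_⟩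
                  exact (dropM_append t x (a + 1) (by omega)).2 ⟨ha4, hxM⟩
                rw [hA, hP]
                by_cases hxD : x = "D" ∨ x = "mD"
                · rw [pairsStep_D _ _ _ _ hne0 hxM hxD, if_neg (by rintro ⟨h, -⟩; simp at h)]
                · rw [pairsStep_other _ _ _ _ hne0 hxI hxM hxD]
          · have hpit : piChar t = none := by
              rw [piChar_eval_some t a hstf hli]; exact if_neg hbr
            rw [hpit]
            by_cases hxI : x = "I"
            · subst hxI
              have hA : get_exon_pairs_alt (t ++ ["I"]) = get_exon_pairs_alt t := by
                rw [alt_append_I t hn]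
                rcases Nat.eq_zero_or_pos a with ha0 | ha0
                · subst ha0
                  rw [iIdx_eq_nil t (fun k hk0 hkl => hano k hk0 hkl)]
                  simp
                · rw [iIdx_getLast t a hli ha0]
                  have hb : bCheck (t ++ ["I"]) (a : Int) (t.length : Int) = false := by
                    rw [bCheck_new t "I" a haln]
                    rcases Nat.lt_or_ge (a + 1) t.length with ha2 | ha2
                    · rw [getD_append_lt _ _ _ ha2]
                      by_cases hD3 : t.getD (a + 1) "" = "D" ∨ t.getD (a + 1) "" = "mD"
                      · have hM : (t.drop (a + 1)).contains "M" = true := by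
                          cases h : (t.drop (a + 1)).contains "M"
                          · exact absurd ⟨ha0, ha2, hD3, h⟩ hbr
                          · rfl
                        have hMm : "M" ∈ List.drop (a + 1) t := by
                          rw [List.contains_iff_mem] at hM; exact hM
                        simp [hMm]
                      · have h1 : ¬ t.getD (a + 1) "" = "D" := fun h => hD3 (Or.inl h)
                        have h2 : ¬ t.getD (a + 1) "" = "mD" := fun h => hD3 (Or.inr h)
                        rw [List.getD_eq_getElem?_getD] at h1 h2
                        simp [h1, h2]
                    · have hg : (t ++ ["I"]).getD (a + 1) "" = "I" := by
                        rw [show a + 1 = t.length by omega, getD_append_self]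
                      rw [hg]; simp
                  simp [hb]
              have hP : piChar (t ++ ["I"]) = none := by
                rw [piChar_eval_some _ t.length
                  (stuck_no t "I" hstf (by rintro ⟨-, -, h | h⟩ <;> simp at h))
                  (by rw [lastIdxI_append]; rfl), if_neg]
                rintro ⟨-, hlt, -, -⟩
                simp only [List.length_append, List.length_cons, List.length_nil] at hlt
                omega
              rw [hA, hP, pairsStep_skipI _ _ _ _ hne0 rfl rfl]
            · by_cases hxM : x = "M"
              · subst hxM
                have hA : get_exon_pairs_alt (t ++ ["M"]) = get_exon_pairs_alt t :=
                  alt_append_notI t "M" (by simp)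
                have hP : piChar (t ++ ["M"]) = none := by
                  rw [piChar_eval_some _ a (stuck_M t)
                    (by rw [lastIdxI_append, if_neg (by decide)]; exact hli), if_neg]
                  rintro ⟨-, -, -, hM⟩
                  rw [dropM_append t "M" (a + 1) (by omega)] at hM
                  exact hM.2 rfl
                rw [hA, hP, pairsStep_M _ _ _ hne0]
              · have hA : get_exon_pairs_alt (t ++ [x]) = get_exon_pairs_alt t :=
                  alt_append_notI t x (fun h => hxI h.1)
                by_cases hxD : x = "D" ∨ x = "mD"
                · by_cases hpv : t[t.length - 1]?.getD "" = "I"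
                  · have halast : a = t.length - 1 := by
                      have h := lastIdxI_of_last t hn
                        (by rw [List.getD_eq_getElem?_getD]; exact hpv)
                      rw [hli] at h
                      exact Option.some.inj h
                    rcases Nat.lt_or_ge t.length 2 with hlen1 | hlen2
                    · -- t.length = 1 : entering the stuck state
                      have hl1 : t.length = 1 := by omega
                      have hsx : stuckB (t ++ [x]) = true := by
                        apply stuck_one t x hl1 _ hxD
                        rw [List.getD_eq_getElem?_getD, show (0 : Nat) = t.length - 1 by omega]
                        exact hpv
                      have hP : piChar (t ++ [x]) = some 0 := piChar_stuck _ hsx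
                      rw [hA, hP, pairsStep_D _ _ _ _ hne0 hxM hxD,
                        if_pos ⟨rfl, by rw [hprev]; exact hpv⟩,
                        show (t.length : Int) - 1 = 0 by omega]
                    · have hP : piChar (t ++ [x]) = some ((t.length - 1 : Nat) : Int) := by
                        rw [piChar_eval_some _ (t.length - 1)
                          (stuck_no t x hstf (by rintro ⟨h1, -, -⟩; omega))
                          (by rw [lastIdxI_append, if_neg hxI, hli, halast]), if_pos]
                        refine ⟨by omega, by simp; omega, ?_, ?_⟩
                        · have h1 : t.length - 1 + 1 = t.length := by omega
                          rw [h1, getD_append_self]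
                          exact hxD
                        · have h1 : t.length - 1 + 1 = t.length := by omega
                          rw [h1, List.drop_append_of_le_length (le_refl _), List.drop_length]
                          rw [contains_false_iff]
                          simp only [List.nil_append, List.mem_singleton]
                          intro h; exact hxM h.symm
                      rw [hA, hP, pairsStep_D _ _ _ _ hne0 hxM hxD,
                        if_pos ⟨rfl, by rw [hprev]; exact hpv⟩,
                        show ((t.length - 1 : Nat) : Int) = (t.length : Int) - 1 by omega]
                  · have hP : piChar (t ++ [x]) = none := by
                      rw [piChar_eval_some _ a
                        (stuck_no t x hstf (by
                          rintro ⟨h1, h0, -⟩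
                          apply hpv
                          rw [← List.getD_eq_getElem?_getD, show t.length - 1 = 0 by omega]
                          exact h0))
                        (by rw [lastIdxI_append, if_neg hxI]; exact hli), if_neg]
                      rintro ⟨hc1, hc2, hc3, hc4⟩
                      have ha2 : a + 1 < t.length := by
                        have hane : a ≠ t.length - 1 := by
                          intro h
                          apply hpv
                          rw [← List.getD_eq_getElem?_getD, ← h]
                          exact haI
                        simp only [List.length_append, List.length_cons,
                          List.length_nil] at hc2
                        omega
                      rw [getD_append_lt _ _ _ ha2] at hc3
                      rw [dropM_append t x (a + 1) (by omega)] at hc4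
                      exact hbr ⟨hc1, ha2, hc3, hc4.1⟩
                    rw [hA, hP, pairsStep_D _ _ _ _ hne0 hxM hxD,
                      if_neg (by rintro ⟨-, h⟩; rw [hprev] at h; exact hpv h)]
                · have hP : piChar (t ++ [x]) = none := by
                    rw [piChar_eval_some _ a
                      (stuck_no t x hstf (by rintro ⟨-, -, h⟩; exact hxD h))
                      (by rw [lastIdxI_append, if_neg hxI]; exact hli), if_neg]
                    rintro ⟨hc1, hc2, hc3, hc4⟩
                    rcases Nat.lt_or_ge (a + 1) t.length with ha2 | ha2
                    · rw [getD_append_lt _ _ _ ha2] at hc3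
                      rw [dropM_append t x (a + 1) (by omega)] at hc4
                      exact hbr ⟨hc1, ha2, hc3, hc4.1⟩
                    · have hg : (t ++ [x]).getD (a + 1) "" = x := by
                        rw [show a + 1 = t.length by omega, getD_append_self]
                      rw [hg] at hc3
                      exact hxD hc3
                  rw [hA, hP, pairsStep_other _ _ _ _ hne0 hxI hxM hxD]

-- ===== tightness: A and B differ everywhere inside D_ =====

lemma getD_eq_get (s : List String) (m : Nat) (hm : m < s.length) : s.getD m "" = s[m] := by
  rw [List.getD_eq_getElem?_getD, List.getElem?_eq_getElem hm]; rfl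

lemma mem_take_of_le {y : String} {s : List String} {m n : Nat} (h : m ≤ n)
    (hy : y ∈ s.take m) : y ∈ s.take n := by
  apply List.take_subset m (s.take n)
  rwa [List.take_take, Nat.min_eq_left h]

lemma self_mem_take (s : List String) (m : Nat) (hm : m < s.length) : s[m] ∈ s.take (m + 1) := by
  rw [List.mem_iff_getElem]
  refine ⟨m, by rw [List.length_take]; omega, ?_⟩
  rw [List.getElem_take]

lemma mem_take_getD (y : String) (s : List String) (n : Nat) (h : y ∈ s.take n) :
    ∃ i, i < n ∧ i < s.length ∧ s.getD i "" = y := by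
  obtain ⟨i, hi, hg⟩ := List.mem_iff_getElem.1 h
  rw [List.length_take] at hi
  refine ⟨i, by omega, by omega, ?_⟩
  rw [getD_eq_get s i (by omega), ← hg, List.getElem_take]

lemma mem_zip_tail_of {l : List Int} (hs : l.Pairwise (· < ·)) {x y : Int}
    (hx : x ∈ l) (hy : y ∈ l) (hxy : x < y) (hbt : ∀ c ∈ l, ¬(x < c ∧ c < y)) :
    (x, y) ∈ l.zip l.tail := by
  induction l with
  | nil => simp at hx
  | cons u l ih =>
    cases l with
    | nil =>
      have hxu : x = u := by simpa using hx
      have hyu : y = u := by simpa using hy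
      rw [hxu, hyu] at hxy
      exact absurd hxy (lt_irrefl _)
    | cons v l' =>
      have hpw := List.pairwise_cons.1 hs
      simp only [List.tail_cons, List.zip_cons_cons, List.mem_cons, Prod.mk.injEq]
      rcases List.mem_cons.1 hx with rfl | hx'
      · have hyv : y = v := by
          rcases List.mem_cons.1 hy with rfl | hy'
          · exact absurd hxy (lt_irrefl _)
          · rcases List.mem_cons.1 hy' with rfl | hy''
            · rfl
            · exact absurd ⟨hpw.1 v (by simp), (List.pairwise_cons.1 hpw.2).1 y hy''⟩
                (hbt v (by simp))
        exact Or.inl ⟨rfl, hyv⟩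
      · right
        have hyu : y ≠ u := by
          intro h
          rw [h] at hxy
          exact absurd (lt_trans (hpw.1 x hx') hxy) (lt_irrefl _)
        have hy' : y ∈ v :: l' := by
          rcases List.mem_cons.1 hy with rfl | h
          · exact absurd rfl hyu
          · exact h
        exact ih hpw.2 hx' hy' (fun c hc => hbt c (List.mem_cons_of_mem _ hc))

lemma pairsFold_take_succ (s : List String) (m : Nat) (hm : m < s.length) :
    pairsFold s (s.take (m + 1)) = pairsStep s (pairsFold s (s.take m)) ((m : Int), s[m]) := by
  rw [List.take_add_one, List.getElem?_eq_getElem hm]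
  have hl : (s.take m).length = m := by rw [List.length_take]; omega
  rw [show (some (s[m]'hm)).toList = [s[m]'hm] from rfl, pairsFold_append, hl]

lemma B_early (s : List String) (hd : D_get_exon_pairs s) :
    ∃ a b : Nat, ((a : Int), (b : Int)) ∈ get_exon_pairs_alt s ∧ "M" ∉ s.take b := by
  obtain ⟨h0, h1, b, hblen, a, hab, ha0, haI, hbI, haD, hbM⟩ := hd
  have hP : ∃ k, a < k ∧ k < s.length ∧ s.getD k "" = "I" := ⟨b, hab, hblen, hbI⟩
  obtain ⟨hab0, hb0len, hb0I⟩ := Nat.find_spec hP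
  have hb0le : Nat.find hP ≤ b := Nat.find_min' hP ⟨hab, hblen, hbI⟩
  have hMb0 : "M" ∉ s.take (Nat.find hP) := fun hm => hbM (mem_take_of_le hb0le hm)
  refine ⟨a, Nat.find hP, ?_, hMb0⟩
  rw [alt_eq_filter, List.mem_filter]
  constructor
  · apply mem_zip_tail_of (iIdx_sorted s)
    · exact (mem_iIdx_iff s _).2 ⟨a, rfl, ha0, by omega, haI⟩
    · exact (mem_iIdx_iff s _).2 ⟨Nat.find hP, rfl, by omega, hb0len, hb0I⟩
    · exact_mod_cast hab0
    · rintro c hc ⟨hc1, hc2⟩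
      obtain ⟨m, rfl, hm0, hmlen, hmI⟩ := (mem_iIdx_iff s _).1 hc
      exact Nat.find_min hP (by exact_mod_cast hc2) ⟨by exact_mod_cast hc1, hmlen, hmI⟩
  · rw [bCheck_eval]
    have hDor : s.getD (a + 1) "" = "D" ∨ s.getD (a + 1) "" = "mD" := by simpa using haD
    have hcontm : "M" ∉ (s.drop (a + 1)).take (Nat.find hP - (a + 1)) := by
      intro hm
      apply hMb0
      have h' : "M" ∈ (s.take (Nat.find hP)).drop (a + 1) := by
        rw [List.drop_take]
        exact hm
      exact List.drop_subset _ _ h'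
    rcases hDor with h | h <;> rw [List.getD_eq_getElem?_getD] at h <;> simp [h] <;>
      exact hcontm

lemma A_stuck_inv (s : List String) (_h2 : 2 ≤ s.length) (h0 : s.getD 0 "" = "I")
    (h1 : s.getD 1 "" = "D" ∨ s.getD 1 "" = "mD") :
    ∀ m, m ≤ s.length →
      (m ≤ 1 ∧ pairsFold s (s.take m) = ([], none))
      ∨ ("M" ∉ s.take m ∧ 2 ≤ m ∧ pairsFold s (s.take m) = ([], some 0))
      ∨ ("M" ∈ s.take m ∧ ∀ p ∈ (pairsFold s (s.take m)).1,
          ∃ num : Nat, p.2 = (num : Int) ∧ "M" ∈ s.take num) := by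
  intro m
  induction m with
  | zero => exact fun _ => Or.inl ⟨by omega, by rw [List.take_zero]; rfl⟩
  | succ m ihm =>
    intro hm1
    have hm : m < s.length := by omega
    have hstep := pairsFold_take_succ s m hm
    rcases ihm (by omega) with ⟨hle1, hst⟩ | ⟨hM, hm2, hst⟩ | ⟨hM, hps⟩
    · rcases Nat.eq_zero_or_pos m with rfl | hmpos
      · left
        refine ⟨by omega, ?_⟩
        rw [hstep, hst]
        unfold pairsStep
        simp
      · obtain rfl : m = 1 := by omega
        right; left
        have hx1 : s[1]'(by omega) = "D" ∨ s[1]'(by omega) = "mD" := by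
          rw [← getD_eq_get s 1 (by omega)]; exact h1
        have hxM : ¬ s[1]'(by omega) = "M" := by rcases hx1 with h | h <;> rw [h] <;> decide
        refine ⟨?_, by omega, ?_⟩
        · intro hmm
          obtain ⟨i, hi2, hilen, hig⟩ := mem_take_getD "M" s 2 hmm
          have : i = 0 ∨ i = 1 := by omega
          rcases this with rfl | rfl
          · rw [hig] at h0; exact absurd h0 (by decide)
          · rcases h1 with h | h <;> rw [hig] at h <;> exact absurd h (by decide)
        · rw [hstep, hst, pairsStep_D s _ _ _ (by omega) hxM hx1, if_pos]
          · rw [show (((1 : Nat) : Int)) - 1 = 0 by omega]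
          · refine ⟨rfl, ?_⟩
            rw [show (((1 : Nat) : Int)) - 1 = ((0 : Nat) : Int) by omega,
              PySem.List.pyGet?_natCast, ← List.getD_eq_getElem?_getD]
            exact h0
    · have hne : ¬ ((m : Int) = 0) := by omega
      by_cases hxM : s[m] = "M"
      · right; right
        constructor
        · rw [← hxM]; exact self_mem_take s m hm
        · rw [hstep, hst, hxM, pairsStep_M _ _ _ hne]
          intro p hp
          simp at hp
      · right; left
        refine ⟨?_, by omega, ?_⟩
        · rw [List.take_add_one, List.getElem?_eq_getElem hm]
          intro hmm
          rcases List.mem_append.1 hmm with h | h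
          · exact hM h
          · simp at h; exact hxM h.symm
        · rw [hstep, hst]
          by_cases hxI : s[m] = "I"
          · rw [pairsStep_Izero _ _ _ _ hne hxI rfl]
          · by_cases hxD : s[m] = "D" ∨ s[m] = "mD"
            · rw [pairsStep_D _ _ _ _ hne hxM hxD, if_neg (by rintro ⟨h, -⟩; simp at h)]
            · rw [pairsStep_other _ _ _ _ hne hxI hxM hxD]
    · have hm1' : 1 ≤ m := by
        by_contra hc
        rw [show m = 0 by omega] at hM
        simp at hM
      have hne : ¬ ((m : Int) = 0) := by omega
      right; right
      refine ⟨mem_take_of_le (by omega) hM, ?_⟩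
      rw [hstep]
      by_cases hxI : s[m] = "I"
      · cases hpi : (pairsFold s (s.take m)).2 with
        | none =>
          rw [pairsStep_skipI _ _ _ _ hne hxI hpi]
          exact hps
        | some v =>
          by_cases hv : v = 0
          · subst hv
            rw [pairsStep_Izero _ _ _ _ hne hxI hpi]
            exact hps
          · rw [pairsStep_closeI _ _ _ _ v hne hxI hpi hv]
            intro p hp
            rcases List.mem_append.1 hp with hp' | hp'
            · exact hps p hp'
            · simp only [List.mem_singleton] at hp'
              exact ⟨m, by rw [hp'], hM⟩
      · by_cases hxM : s[m] = "M"
        · rw [hxM, pairsStep_M _ _ _ hne]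
          exact hps
        · by_cases hxD : s[m] = "D" ∨ s[m] = "mD"
          · rw [pairsStep_D _ _ _ _ hne hxM hxD]
            by_cases hc : (pairsFold s (s.take m)).2 = none
                ∧ (PySem.List.pyGet? s ((m : Int) - 1)).getD "" = "I"
            · rw [if_pos hc]; exact hps
            · rw [if_neg hc]; exact hps
          · rw [pairsStep_other _ _ _ _ hne hxI hxM hxD]
            exact hps

-- ===== VERDICT(by name: the statement is the Claim_ definition above) =====
theorem get_exon_pairs_spec : Claim_unchanged_get_exon_pairs := by
  intro s _ hD
  show get_exon_pairs s = get_exon_pairs_alt s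
  unfold get_exon_pairs
  rw [main_inv s hD]

theorem get_exon_pairs_changed : Claim_changed_get_exon_pairs := by
  unfold Claim_changed_get_exon_pairs; decide

theorem get_exon_pairs_tight : Claim_exact_get_exon_pairs := by
  intro s _ hd heq
  obtain ⟨a, b0, hmem, hMb0⟩ := B_early s hd
  obtain ⟨h0, h1, b, hblen, a', hab, ha0, -, -, -, -⟩ := hd
  have h1' : s.getD 1 "" = "D" ∨ s.getD 1 "" = "mD" := by simpa using h1
  have hlen : 2 ≤ s.length := by omega
  rw [← heq] at hmem
  have hmem' : ((a : Int), (b0 : Int)) ∈ (pairsFold s s).1 := hmem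
  rcases A_stuck_inv s hlen h0 h1' s.length (le_refl _) with ⟨hl, -⟩ | ⟨-, -, hst⟩ | ⟨-, hps⟩
  · omega
  · rw [List.take_length] at hst
    rw [hst] at hmem'
    simp at hmem'
  · rw [List.take_length] at hps
    obtain ⟨num, hnum, hMnum⟩ := hps _ hmem'
    have hbn : b0 = num := by exact_mod_cast (show ((b0 : Nat) : Int) = (num : Int) from hnum)
    exact hMb0 (hbn ▸ hMnum)
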